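-- pv_equiv track=rewrite | github.com/kiwithecode/sistemadecalidaimagenes | app/utils/barcode.py | match_expected_codes
-- ===== SOURCE A (Python) =====
-- def match_expected_codes(found, expected_patterns):
--     if not expected_patterns:
--         return True, []
--     misses = []
--     for pat in expected_patterns:
--         if ":" in pat:
--             typ, pref = pat.split(":", 1)
--             ok = any((f["type"].upper()==typ.upper() and pref in f["data"]) for f in found)
--         else:
--             ok = any(pat in f["data"] for f in found)
--         if not ok:
--             misses.append(pat)
--     return (len(misses)==0), misses
-- ===== SOURCE B (Python) =====
-- def match_expected_codes(found, expected_patterns):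
--     if not expected_patterns:
--         return True, []
--     # parse each pattern once: (pattern, uppercased type or None, needle)
--     parsed = []
--     for pat in expected_patterns:
--         if ":" in pat:
--             typ, pref = pat.split(":", 1)
--             parsed.append((pat, typ.upper(), pref))
--         else:
--             parsed.append((pat, None, pat))
--     matched = set()
--     for f in found:
--         ftyp = f["type"].upper()
--         fdata = f["data"]
--         for pat, typu, needle in parsed:
--             if pat in matched:
--                 continue
--             if (typu is None or typu == ftyp) and needle in fdata:
--                 matched.add(pat)
--     misses = [p for p in expected_patterns if p not in matched]
--     return (len(misses) == 0), misses
-- ===== Notes on version B (the rewrite author's own statement) =====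
-- stated objective: alternative
-- what changed: Inverts the loop nesting: patterns are parsed once, then a single pass over the found codes maintains a set of matched patterns, and the misses are a final filter of expected_patterns, instead of A's per-pattern any()-scan over found.
-- outside the precondition, e.g. on match_expected_codes([{'data': 'x'}], ['x']): A returns (True, []), B raises KeyError; on match_expected_codes([{'type': 'QR', 'data': 'x'}, {'type': 'QR'}], ['x']): A returns (True, []), B raises KeyError
import Mathlib
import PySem

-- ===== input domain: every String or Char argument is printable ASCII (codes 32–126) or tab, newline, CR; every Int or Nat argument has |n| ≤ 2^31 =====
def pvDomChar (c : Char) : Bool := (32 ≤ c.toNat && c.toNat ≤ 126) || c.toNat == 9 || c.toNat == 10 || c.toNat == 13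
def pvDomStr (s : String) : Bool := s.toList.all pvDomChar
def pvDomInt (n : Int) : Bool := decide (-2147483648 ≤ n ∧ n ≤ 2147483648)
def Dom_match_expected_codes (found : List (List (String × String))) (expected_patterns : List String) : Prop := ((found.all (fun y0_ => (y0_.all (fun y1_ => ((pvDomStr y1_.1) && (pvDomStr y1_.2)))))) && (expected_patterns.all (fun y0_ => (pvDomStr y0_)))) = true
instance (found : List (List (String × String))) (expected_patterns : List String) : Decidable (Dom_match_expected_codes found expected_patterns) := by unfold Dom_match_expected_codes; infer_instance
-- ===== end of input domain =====

-- B re-decomposes A: parse patterns once, one pass over `found` filling a matched-set, misses = final filter.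
-- Equivalence of return values only; dict lookups are ported with getD "" — exact under Pre_ (keys present).

-- shared helper: pat.split(":", 1) when ":" is known to occur in pat (two pieces)
def pvSplitOnce (pat : String) : String × String :=
  match PySem.Str.splitMax? pat ":" 1 with
  | some (t :: p :: _) => (t, p)
  | _ => ("", "")

-- ===== PORT A =====
def match_expected_codes (found : List (List (String × String))) (expected_patterns : List String) : Bool × List String :=
  if expected_patterns = [] then (true, [])
  else
    let misses := expected_patterns.foldl (fun misses pat =>
      let ok :=
        if PySem.Str.isIn ":" pat then
          let tp := pvSplitOnce pat
          found.any (fun f =>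
            (PySem.Str.upper ((PySem.Dict.mk f).getD "type" "") == PySem.Str.upper tp.1)
              && PySem.Str.isIn tp.2 ((PySem.Dict.mk f).getD "data" ""))
        else
          found.any (fun f => PySem.Str.isIn pat ((PySem.Dict.mk f).getD "data" ""))
      if !ok then misses ++ [pat] else misses) []
    ((misses.length == 0 : Bool), misses)

-- ===== PORT B =====
-- B-side helpers, named so the port mirrors Source B's three phases (parse / scan found / filter)
def pvParse (pat : String) : String × Option String × String :=
  if PySem.Str.isIn ":" pat then
    (pat, some (PySem.Str.upper (pvSplitOnce pat).1), (pvSplitOnce pat).2)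
  else (pat, none, pat)

-- the per-entry test of Source B's inner loop ('(typu is None or typu == ftyp) and needle in fdata')
def pvTest (f : List (String × String)) (e : String × Option String × String) : Bool :=
  (match e.2.1 with
    | none => true
    | some t => t == PySem.Str.upper ((PySem.Dict.mk f).getD "type" ""))
  && PySem.Str.isIn e.2.2 ((PySem.Dict.mk f).getD "data" "")

-- Source B's inner loop over parsed entries for one found code f
def pvFoundStep (f : List (String × String)) (parsed : List (String × Option String × String)) (m : PySem.Set String) : PySem.Set String :=
  parsed.foldl (fun m e =>
    if PySem.Set.contains m e.1 then m
    else if pvTest f e then PySem.Set.add m e.1 else m) m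

def match_expected_codes_alt (found : List (List (String × String))) (expected_patterns : List String) : Bool × List String :=
  if expected_patterns = [] then (true, [])
  else
    let parsed := expected_patterns.map pvParse
    let matched := found.foldl (fun m f => pvFoundStep f parsed m) PySem.Set.empty
    let misses := expected_patterns.filter (fun p => !(PySem.Set.contains matched p))
    ((misses.length == 0 : Bool), misses)

-- ===== PRECONDITION & SPEC =====
-- Pre_ excludes inputs where some found dict lacks a "type" or "data" key: A raises KeyError on most of
-- them and, where any()'s short-circuit or an untouched key lets A still return, B's single pass raises.
def Pre_match_expected_codes (found : List (List (String × String))) (expected_patterns : List String) : Prop :=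
  expected_patterns = [] ∨ ∀ f ∈ found, ((PySem.Dict.mk f).contains "type" ∧ (PySem.Dict.mk f).contains "data")
instance (found : List (List (String × String))) (expected_patterns : List String) : Decidable (Pre_match_expected_codes found expected_patterns) := by unfold Pre_match_expected_codes; infer_instance

def pvWitness_match_expected_codes : (List (List (String × String))) × List String :=
  ([[("type", "QR"), ("data", "abc123")]], ["qr:abc", "zzz"])

def Spec_match_expected_codes (found : List (List (String × String))) (expected_patterns : List String) (out : Bool × List String) : Prop := out = match_expected_codes_alt found expected_patterns
instance (found : List (List (String × String))) (expected_patterns : List String) (out : Bool × List String) : Decidable (Spec_match_expected_codes found expected_patterns out) := by unfold Spec_match_expected_codes; infer_instance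

-- ===== CLAIM (what is proved, stated in full; the proofs are below) =====
def Claim_equal_match_expected_codes : Prop := ∀ (found : List (List (String × String))) (expected_patterns : List String), Dom_match_expected_codes found expected_patterns → Pre_match_expected_codes found expected_patterns → Spec_match_expected_codes found expected_patterns (match_expected_codes found expected_patterns)

-- ===== LEMMAS AND PROOFS =====

-- the per-found-code per-pattern match test, exactly as A computes it
def pvMatches (f : List (String × String)) (pat : String) : Bool :=
  if PySem.Str.isIn ":" pat then
    (PySem.Str.upper ((PySem.Dict.mk f).getD "type" "") == PySem.Str.upper (pvSplitOnce pat).1)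
      && PySem.Str.isIn (pvSplitOnce pat).2 ((PySem.Dict.mk f).getD "data" "")
  else
    PySem.Str.isIn pat ((PySem.Dict.mk f).getD "data" "")

-- A's per-pattern ok-test
def pvOk (found : List (List (String × String))) (pat : String) : Bool :=
  if PySem.Str.isIn ":" pat then
    found.any (fun f =>
      (PySem.Str.upper ((PySem.Dict.mk f).getD "type" "") == PySem.Str.upper (pvSplitOnce pat).1)
        && PySem.Str.isIn (pvSplitOnce pat).2 ((PySem.Dict.mk f).getD "data" ""))
  else
    found.any (fun f => PySem.Str.isIn pat ((PySem.Dict.mk f).getD "data" ""))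

lemma pvOk_any (found : List (List (String × String))) (pat : String) :
    pvOk found pat = found.any (fun f => pvMatches f pat) := by
  unfold pvOk pvMatches
  by_cases h : PySem.Str.isIn ":" pat = true
  · simp only [if_pos h]
  · simp only [if_neg h]

lemma pvParse_fst (pat : String) : (pvParse pat).1 = pat := by
  unfold pvParse; split <;> rfl

lemma pvTest_eq (f : List (String × String)) (pat : String) :
    pvTest f (pvParse pat) = pvMatches f pat := by
  unfold pvTest pvParse pvMatches
  by_cases h : PySem.Str.isIn ":" pat = true
  · simp only [if_pos h]
    have hcomm : ∀ a b : String, (a == b) = (b == a) := by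
      intro a b
      by_cases hab : a = b
      · subst hab; rfl
      · rw [beq_eq_false_iff_ne.2 hab, beq_eq_false_iff_ne.2 (Ne.symm hab)]
    rw [hcomm]
  · simp only [if_neg h]
    simp

lemma pvContains_add (s : PySem.Set String) (x y : String) :
    PySem.Set.contains (PySem.Set.add s x) y = (PySem.Set.contains s y || y == x) := by
  apply Bool.eq_iff_iff.mpr
  simp [PySem.Set.mem_add]

lemma pvStep_contains (f : List (String × String)) (m : PySem.Set String) (q p : String) :
    PySem.Set.contains
      (if PySem.Set.contains m (pvParse q).1 then m
       else if pvTest f (pvParse q) then PySem.Set.add m (pvParse q).1 else m) p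
    = (PySem.Set.contains m p || (q == p && pvMatches f q)) := by
  rw [pvParse_fst, pvTest_eq]
  by_cases hc : PySem.Set.contains m q = true
  · rw [if_pos hc]
    by_cases hqp : q = p
    · subst hqp; rw [hc]; simp
    · simp [beq_eq_false_iff_ne.2 hqp]
  · rw [if_neg hc]
    by_cases hm : pvMatches f q = true
    · rw [if_pos hm, pvContains_add]
      by_cases hqp : q = p
      · subst hqp; simp [hm]
      · simp [beq_eq_false_iff_ne.2 hqp, beq_eq_false_iff_ne.2 (Ne.symm hqp)]
    · rw [if_neg hm]
      simp only [Bool.not_eq_true] at hm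
      simp [hm]

lemma pvFoundStep_cons (f : List (String × String)) (e : String × Option String × String)
    (es : List (String × Option String × String)) (m : PySem.Set String) :
    pvFoundStep f (e :: es) m
      = pvFoundStep f es
          (if PySem.Set.contains m e.1 then m
           else if pvTest f e then PySem.Set.add m e.1 else m) := rfl

lemma pv_inner (f : List (String × String)) (pats : List String) (m : PySem.Set String) (p : String) :
    PySem.Set.contains (pvFoundStep f (pats.map pvParse) m) p
    = (PySem.Set.contains m p || pats.any (fun q => q == p && pvMatches f q)) := by
  induction pats generalizing m with
  | nil => simp [pvFoundStep]
  | cons q pats ih =>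
    rw [List.map_cons, pvFoundStep_cons, ih, pvStep_contains, List.any_cons, Bool.or_assoc]

lemma pv_outer (found : List (List (String × String))) (pats : List String) (m : PySem.Set String) (p : String) :
    PySem.Set.contains (found.foldl (fun m f => pvFoundStep f (pats.map pvParse) m) m) p
    = (PySem.Set.contains m p || found.any (fun f => pats.any (fun q => q == p && pvMatches f q))) := by
  induction found generalizing m with
  | nil => simp
  | cons f found ih =>
    rw [List.foldl_cons, ih, pv_inner, List.any_cons, Bool.or_assoc]

lemma pv_any_self (l : List String) (p : String) (hp : p ∈ l) (h : String → Bool) :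
    (l.any fun q => q == p && h q) = h p := by
  by_cases hh : h p = true
  · rw [hh]
    rw [List.any_eq_true]
    exact ⟨p, hp, by simp [hh]⟩
  · simp only [Bool.not_eq_true] at hh
    rw [hh]
    rw [List.any_eq_false]
    intro q hq
    by_cases hqp : q = p
    · subst hqp; simp [hh]
    · simp [beq_eq_false_iff_ne.2 hqp]

-- ===== VERDICT (by name: the statement is the Claim_ definition above) =====
theorem match_expected_codes_spec : Claim_equal_match_expected_codes := by
  intro found expected _ _
  unfold Spec_match_expected_codes match_expected_codes match_expected_codes_alt
  by_cases he : expected = []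
  · subst he; rfl
  · simp only [if_neg he]
    have hA : (expected.foldl (fun misses pat =>
        if !(if PySem.Str.isIn ":" pat then
            found.any (fun f =>
              (PySem.Str.upper ((PySem.Dict.mk f).getD "type" "") == PySem.Str.upper (pvSplitOnce pat).1)
                && PySem.Str.isIn (pvSplitOnce pat).2 ((PySem.Dict.mk f).getD "data" ""))
          else found.any (fun f => PySem.Str.isIn pat ((PySem.Dict.mk f).getD "data" "")))
        then misses ++ [pat] else misses) [])
        = expected.filter (fun pat => !pvOk found pat) := by
      have h0 := PySem.List.foldl_append_if_eq_filter (p := fun pat => !pvOk found pat)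
        (l := expected) (acc := ([] : List String))
      rw [List.nil_append] at h0
      unfold pvOk at h0
      rw [h0]
      rfl
    have hB : ∀ pat ∈ expected,
        (!(PySem.Set.contains
            (found.foldl (fun m f => pvFoundStep f (expected.map pvParse) m) PySem.Set.empty) pat))
        = (!pvOk found pat) := by
      intro pat hpat
      rw [pv_outer]
      have hempty : PySem.Set.contains (PySem.Set.empty : PySem.Set String) pat = false := rfl
      rw [hempty, Bool.false_or]
      rw [pvOk_any]
      have : found.any (fun f => expected.any (fun q => q == pat && pvMatches f q))
          = found.any (fun f => pvMatches f pat) :=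
        List.any_congr rfl (fun f => pv_any_self expected pat hpat (pvMatches f))
      rw [this]
    rw [hA, List.filter_congr hB, List.filter_congr (fun pat _ => rfl)]
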